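-- pv_equiv track=rewrite | github.com/method-shop/ai | main.py | format_code_block
-- ===== SOURCE A (Python) =====
-- def format_code_block(code: str) -> str:
--
--     formatted_lines = []
--     prev_line_empty = False
--
--     for line in code.splitlines():
--         line = line.rstrip()
--         if not line.strip():
--             if not prev_line_empty:
--                 formatted_lines.append('')
--                 prev_line_empty = True
--             continue
--
--         formatted_lines.append(line)
--         prev_line_empty = False
--
--     return '\n'.join(formatted_lines)
-- ===== SOURCE B (Python) =====
-- def format_code_block(code: str) -> str:
--     # map every line through rstrip, then keep a line unless it is empty and
--     # the previous (rstripped) line was empty too; join the kept lines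
--     lines = [line.rstrip() for line in code.splitlines()]
--     kept = [cur for prev, cur in zip([None] + lines, lines) if cur or prev != '']
--     return '\n'.join(kept)
-- ===== Notes on version B (the rewrite author's own statement) =====
-- stated objective: simpler
-- what changed: Replaces the stateful loop with its prev_line_empty flag by a map of rstrip over all lines followed by a zip-with-predecessor filter that drops an empty line exactly when the previous rstripped line was empty.
import Mathlib
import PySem

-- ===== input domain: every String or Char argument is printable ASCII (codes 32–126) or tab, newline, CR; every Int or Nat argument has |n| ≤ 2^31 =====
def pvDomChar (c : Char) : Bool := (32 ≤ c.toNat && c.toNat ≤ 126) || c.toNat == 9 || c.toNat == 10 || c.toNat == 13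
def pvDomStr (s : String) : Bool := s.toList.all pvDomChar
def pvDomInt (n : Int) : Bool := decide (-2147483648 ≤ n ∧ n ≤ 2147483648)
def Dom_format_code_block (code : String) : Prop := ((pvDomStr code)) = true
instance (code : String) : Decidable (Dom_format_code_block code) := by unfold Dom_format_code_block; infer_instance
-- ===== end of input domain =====

-- B collapses consecutive blank lines via a map of rstrip followed by a
-- zip-with-predecessor filter, instead of A's loop with a prev_line_empty flag.

-- ===== PORT A =====
def format_code_block (code : String) : String :=
  -- formatted_lines = [], prev_line_empty = False; one pass over splitlines
  let st := (PySem.Str.splitlines code).foldl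
    (fun (st : List String × Bool) line =>
      let line := PySem.Str.rstrip line
      if PySem.Str.strip line = "" then
        if st.2 = false then (st.1 ++ [""], true) else st
      else
        (st.1 ++ [line], false))
    ([], false)
  PySem.Str.join "\n" st.1

-- ===== PORT B =====
def format_code_block_alt (code : String) : String :=
  let lines := (PySem.Str.splitlines code).map PySem.Str.rstrip
  let kept := ((((none : Option String) :: lines.map some).zip lines).filter
    (fun pc => pc.2 != "" || pc.1 != some "")).map (·.2)
  PySem.Str.join "\n" kept

-- ===== PRECONDITION & SPEC =====
def Spec_format_code_block (code : String) (out : String) : Prop := out = format_code_block_alt code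
instance (code : String) (out : String) : Decidable (Spec_format_code_block code out) := by unfold Spec_format_code_block; infer_instance

-- ===== CLAIM (what is proved, stated in full; the proofs are below) =====
def Claim_equal_format_code_block : Prop := ∀ (code : String), Dom_format_code_block code → Spec_format_code_block code (format_code_block code)

-- ===== LEMMAS AND PROOFS =====

-- A's loop body as a function of the flag, for the fold characterisation
def pvFA : Bool → List String → List String
  | _, [] => []
  | b, l :: t =>
    if PySem.Str.strip (PySem.Str.rstrip l) = "" then
      if b = false then "" :: pvFA true t else pvFA true t
    else PySem.Str.rstrip l :: pvFA false t

-- B's filter as a recursion on the rstripped lines with the previous value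
def pvKB : Option String → List String → List String
  | _, [] => []
  | p, c :: t =>
    if c != "" || p != some "" then c :: pvKB (some c) t else pvKB (some c) t

theorem dropWhile_all {α : Type} (p : α → Bool) (l : List α) :
    (l.dropWhile p).all p = l.all p := by
  induction l with
  | nil => rfl
  | cons a t ih => by_cases h : p a = true <;> simp [h, ih]

theorem rstrip_eq_nil_iff (cs : List Char) :
    PySem.Chars.rstrip cs = [] ↔ cs.all PySem.Chars.isspace = true := by
  simp [PySem.Chars.rstrip, List.dropWhile_eq_nil_iff, List.all_eq_true]

theorem dropWhile_dropWhile_self {α : Type} (p : α → Bool) (l : List α) :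
    List.dropWhile p (List.dropWhile p l) = List.dropWhile p l := by
  induction l with
  | nil => rfl
  | cons a t ih => by_cases h : p a <;> simp [h, ih]

theorem rstrip_rstrip (cs : List Char) :
    PySem.Chars.rstrip (PySem.Chars.rstrip cs) = PySem.Chars.rstrip cs := by
  simp [PySem.Chars.rstrip, dropWhile_dropWhile_self]

theorem strip_eq_nil_iff (cs : List Char) :
    PySem.Chars.strip cs = [] ↔ PySem.Chars.rstrip cs = [] := by
  rw [PySem.Chars.strip, rstrip_eq_nil_iff, PySem.Chars.lstrip, dropWhile_all,
    ← rstrip_eq_nil_iff]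

theorem toList_eq_nil_iff (s : String) : s = "" ↔ s.toList = [] := by
  constructor
  · rintro rfl; rfl
  · intro h; have := congrArg String.ofList h; simpa using this

theorem strip_rstrip_eq_empty_iff (s : String) :
    (PySem.Str.strip (PySem.Str.rstrip s) = "") ↔ (PySem.Str.rstrip s = "") := by
  rw [toList_eq_nil_iff, toList_eq_nil_iff, PySem.Str.toList_strip,
    PySem.Str.toList_rstrip, strip_eq_nil_iff, rstrip_rstrip]

theorem foldA (ls : List String) (acc : List String) (b : Bool) :
    (ls.foldl
      (fun (st : List String × Bool) line =>
        let line := PySem.Str.rstrip line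
        if PySem.Str.strip line = "" then
          if st.2 = false then (st.1 ++ [""], true) else st
        else (st.1 ++ [line], false))
      (acc, b)).1 = acc ++ pvFA b ls := by
  induction ls generalizing acc b with
  | nil => simp [pvFA]
  | cons l t ih =>
    by_cases h : PySem.Str.strip (PySem.Str.rstrip l) = "" <;>
      cases b <;> simp [pvFA, h, ih]

theorem foldB (rs : List String) (p : Option String) :
    (((p :: rs.map some).zip rs).filter
      (fun pc => pc.2 != "" || pc.1 != some "")).map (·.2) = pvKB p rs := by
  induction rs generalizing p with
  | nil => simp [pvKB]
  | cons c t ih =>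
    by_cases h : (c != "" || p != some "") = true <;>
      simp [pvKB, h, ih]

theorem strip_empty : PySem.Str.strip "" = "" := by decide

theorem bridge (ls : List String) (b : Bool) (p : Option String)
    (hp : p = some "" ↔ b = true) :
    pvFA b ls = pvKB p (ls.map PySem.Str.rstrip) := by
  induction ls generalizing b p with
  | nil => simp [pvFA, pvKB]
  | cons l t ih =>
    by_cases h : PySem.Str.rstrip l = ""
    · have hs : PySem.Str.strip (PySem.Str.rstrip l) = "" :=
        (strip_rstrip_eq_empty_iff l).mpr h
      cases b with
      | false =>
        have hp' : p ≠ some "" := fun hc => by simpa using hp.mp hc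
        simp [pvFA, pvKB, h, hp', strip_empty, ih true (some "") (by simp)]
      | true =>
        have hp' : p = some "" := hp.mpr rfl
        simp [pvFA, pvKB, h, hp', strip_empty, ih true (some "") (by simp)]
    · have hs : ¬ PySem.Str.strip (PySem.Str.rstrip l) = "" := by
        rw [strip_rstrip_eq_empty_iff]; exact h
      simp [pvFA, pvKB, hs, h, ih false (some (PySem.Str.rstrip l)) (by simp [h])]

-- ===== VERDICT (by name: the statement is the Claim_ definition above) =====
theorem format_code_block_spec : Claim_equal_format_code_block := by
  intro code _
  unfold Spec_format_code_block format_code_block format_code_block_alt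
  simp only []
  rw [foldA, foldB, List.nil_append, bridge _ false none (by simp)]
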